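-- pv_equiv track=rewrite | github.com/PamtenRE/pamten-re-backend-python | Career_craft/Career_craft/test-frontend-main/backend/custom_parser.py | _html_paragraph
-- ===== SOURCE A (Python) =====
-- def _html_paragraph(text):
--     """Converts a plain text block into HTML paragraphs, handling newlines."""
--     if not text:
--         return ""
--     paragraphs = []
--     current_paragraph = []
--
--     # Split by lines and process
--     for line in text.split('\n'):
--         stripped_line = line.strip()
--         if stripped_line:
--             current_paragraph.append(stripped_line)
--         else: # Empty line, marks end of a paragraph
--             if current_paragraph:
--                 paragraphs.append("<p>" + " ".join(current_paragraph) + "</p>")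
--                 current_paragraph = []
--     if current_paragraph: # Add last paragraph if any
--         paragraphs.append("<p>" + " ".join(current_paragraph) + "</p>")
--
--     return "\n".join(paragraphs)
-- ===== SOURCE B (Python) =====
-- def _html_paragraph(text):
--     """Converts a plain text block into HTML paragraphs, handling newlines."""
--     if not text:
--         return ""
--     lines = [l.strip() for l in text.split('\n')]
--     out = []
--     i = 0
--     n = len(lines)
--     while i < n:
--         if lines[i]:
--             j = i
--             while j < n and lines[j]:
--                 j += 1
--             out.append("<p>" + " ".join(lines[i:j]) + "</p>")
--             i = j
--         else:
--             i += 1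
--     return "\n".join(out)
-- ===== Notes on version B (the rewrite author's own statement) =====
-- stated objective: alternative
-- what changed: Replaces A's accumulate-and-flush loop (current_paragraph buffer flushed on blank lines and once after the loop) with a two-pointer run scan over the pre-stripped line list: each maximal run of non-empty lines is located and emitted as one paragraph, with no pending-buffer state or post-loop flush.
import Mathlib
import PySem

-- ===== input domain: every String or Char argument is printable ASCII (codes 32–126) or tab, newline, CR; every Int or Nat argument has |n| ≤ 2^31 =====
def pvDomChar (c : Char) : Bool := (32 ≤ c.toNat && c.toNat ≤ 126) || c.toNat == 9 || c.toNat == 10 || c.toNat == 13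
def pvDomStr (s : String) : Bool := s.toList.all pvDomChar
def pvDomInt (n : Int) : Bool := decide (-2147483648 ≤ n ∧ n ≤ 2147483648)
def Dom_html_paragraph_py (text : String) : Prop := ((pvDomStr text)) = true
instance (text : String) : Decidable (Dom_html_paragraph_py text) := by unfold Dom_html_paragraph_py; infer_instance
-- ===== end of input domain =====

-- B replaces A's accumulate-and-flush paragraph buffer with a two-pointer scan over
-- pre-stripped lines that emits each maximal non-empty run directly (alternative structure).

-- "<p>" + " ".join(cur) + "</p>"  (literal in both Pythons)
def pvMkPara (cur : List (List Char)) : List Char :=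
  ['<', 'p', '>'] ++ PySem.Chars.join [' '] cur ++ ['<', '/', 'p', '>']

-- ===== PORT A =====
-- one iteration of A's for-loop: state = (paragraphs, current_paragraph)
def pvStepA (st : List (List Char) × List (List Char)) (line : List Char) :
    List (List Char) × List (List Char) :=
  let stripped := PySem.Chars.strip line
  if stripped ≠ [] then (st.1, st.2 ++ [stripped])
  else if st.2 ≠ [] then (st.1 ++ [pvMkPara st.2], [])
  else st

def html_paragraph_py (text : String) : String :=
  if text == "" then ""
  else
    let st := (PySem.Chars.splitOn text.toList ['\n']).foldl pvStepA ([], [])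
    let paragraphs := if st.2 ≠ [] then st.1 ++ [pvMkPara st.2] else st.1
    String.mk (PySem.Chars.join ['\n'] paragraphs)

-- ===== PORT B =====
-- two-pointer run scan over the already-stripped lines: a run i..j of non-empty lines
-- becomes one paragraph (takeWhile = the inner 'while j < n and lines[j]' scan,
-- dropWhile = resuming at i = j)
def pvRuns : List (List Char) → List (List Char)
  | [] => []
  | l :: rest =>
    if l ≠ [] then
      pvMkPara (l :: rest.takeWhile (· ≠ [])) :: pvRuns (rest.dropWhile (· ≠ []))
    else pvRuns rest
termination_by ls => ls.length
decreasing_by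
  · simpa using Nat.lt_succ_of_le (List.length_dropWhile_le _ _)
  · simp

def html_paragraph_py_alt (text : String) : String :=
  if text == "" then ""
  else
    String.mk (PySem.Chars.join ['\n']
      (pvRuns ((PySem.Chars.splitOn text.toList ['\n']).map PySem.Chars.strip)))

-- ===== PRECONDITION & SPEC =====
def Spec_html_paragraph_py (text : String) (out : String) : Prop := out = html_paragraph_py_alt text
instance (text : String) (out : String) : Decidable (Spec_html_paragraph_py text out) := by unfold Spec_html_paragraph_py; infer_instance

-- ===== CLAIM (what is proved, stated in full; the proofs are below) =====
def Claim_equal_html_paragraph_py : Prop := ∀ (text : String), Dom_html_paragraph_py text → Spec_html_paragraph_py text (html_paragraph_py text)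

-- ===== LEMMAS AND PROOFS =====

-- A's loop over already-stripped lines
def pvStepA' (st : List (List Char) × List (List Char)) (l : List Char) :
    List (List Char) × List (List Char) :=
  if l ≠ [] then (st.1, st.2 ++ [l])
  else if st.2 ≠ [] then (st.1 ++ [pvMkPara st.2], [])
  else st

def pvFlush (st : List (List Char) × List (List Char)) : List (List Char) :=
  if st.2 ≠ [] then st.1 ++ [pvMkPara st.2] else st.1

lemma pvRuns_nil : pvRuns [] = [] := by simp [pvRuns]

lemma pvRuns_cons_empty (rest : List (List Char)) :
    pvRuns ([] :: rest) = pvRuns rest := by simp [pvRuns]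

lemma pvRuns_cons_ne (l : List Char) (rest : List (List Char)) (h : l ≠ []) :
    pvRuns (l :: rest) =
      pvMkPara (l :: rest.takeWhile (· ≠ [])) :: pvRuns (rest.dropWhile (· ≠ [])) := by
  rw [pvRuns]; simp [h]

-- the joint loop invariant: A's flushed fold equals paragraphs-so-far ++ B's runs,
-- where a non-empty current buffer prefixes the first run
lemma pvMain (L : List (List Char)) :
    (∀ paras : List (List Char),
        pvFlush (L.foldl pvStepA' (paras, [])) = paras ++ pvRuns L) ∧
    (∀ (paras cur : List (List Char)), cur ≠ [] →
        pvFlush (L.foldl pvStepA' (paras, cur)) =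
          paras ++ pvMkPara (cur ++ L.takeWhile (· ≠ [])) :: pvRuns (L.dropWhile (· ≠ []))) := by
  induction L with
  | nil =>
    constructor
    · intro paras; simp [pvFlush, pvRuns_nil]
    · intro paras cur hcur; simp [pvFlush, hcur, pvRuns_nil]
  | cons l rest ih =>
    constructor
    · intro paras
      by_cases hl : l = []
      · subst hl
        simp only [List.foldl_cons, pvStepA', pvRuns_cons_empty]
        simpa using ih.1 paras
      · simp only [List.foldl_cons, pvStepA', if_pos (by simpa using hl)]
        rw [show ([] ++ [l] : List (List Char)) = [l] from rfl, ih.2 paras [l] (by simp), pvRuns_cons_ne l rest hl]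
        simp
    · intro paras cur hcur
      by_cases hl : l = []
      · subst hl
        simp only [List.foldl_cons, pvStepA']
        rw [if_neg (by simp), if_pos (by simpa using hcur)]
        rw [ih.1 (paras ++ [pvMkPara cur])]
        simp [List.takeWhile, List.dropWhile, pvRuns_cons_empty]
      · simp only [List.foldl_cons, pvStepA', if_pos (by simpa using hl)]
        rw [ih.2 paras (cur ++ [l]) (by simp)]
        have ht : (l :: rest).takeWhile (· ≠ []) = l :: rest.takeWhile (· ≠ []) := by
          simp [List.takeWhile, hl]
        have hd : (l :: rest).dropWhile (· ≠ []) = rest.dropWhile (· ≠ []) := by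
          simp [List.dropWhile, hl]
        rw [ht, hd]; simp

-- ===== VERDICT (by name: the statement is the Claim_ definition above) =====
theorem html_paragraph_py_spec : Claim_equal_html_paragraph_py := by
  intro text _
  unfold Spec_html_paragraph_py html_paragraph_py html_paragraph_py_alt
  by_cases h : text == ""
  · simp [h]
  · simp only [h, if_false, Bool.false_eq_true]
    have hfold : (PySem.Chars.splitOn text.toList ['\n']).foldl pvStepA ([], []) =
        ((PySem.Chars.splitOn text.toList ['\n']).map PySem.Chars.strip).foldl pvStepA' ([], []) := by
      rw [List.foldl_map]
      rfl
    have := (pvMain ((PySem.Chars.splitOn text.toList ['\n']).map PySem.Chars.strip)).1 []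
    simp only [pvFlush] at this
    rw [hfold, this]
    simp
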